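-- pv_equiv track=rewrite | github.com/EliyahuAI/mcp-server-hyperplexity | auto_commit.py | categorize_changes
-- ===== SOURCE A (Python) =====
-- def categorize_changes(changes):
--     """Categorize changes by type"""
--     categories = {
--         'config': [],
--         'docs': [],
--         'lambdas': [],
--         'frontend': [],
--         'tests': [],
--         'deployment': [],
--         'core': [],
--         'other': []
--     }
--
--     for status, files in changes.items():
--         for file in files:
--             file_lower = file.lower()
--
--             if any(x in file_lower for x in ['config', '.json', '.yml', '.yaml']):
--                 categories['config'].append((status, file))
--             elif any(x in file_lower for x in ['.md', 'readme', 'doc']):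
--                 categories['docs'].append((status, file))
--             elif 'lambda' in file_lower or '/lambdas/' in file:
--                 categories['lambdas'].append((status, file))
--             elif any(x in file_lower for x in ['frontend', '.html', '.php', '.css', '.js']):
--                 categories['frontend'].append((status, file))
--             elif 'test' in file_lower:
--                 categories['tests'].append((status, file))
--             elif any(x in file_lower for x in ['deploy', 'requirement']):
--                 categories['deployment'].append((status, file))
--             elif any(x in file_lower for x in ['src/', 'core/', '.py']) and 'test' not in file_lower:
--                 categories['core'].append((status, file))
--             else:
--                 categories['other'].append((status, file))
--
--     return categories
-- ===== SOURCE B (Python) =====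
-- # Sieve re-implementation: instead of classifying each file through an elif chain,
-- # loop over the categories and repeatedly PARTITION the shrinking stream of entries;
-- # whatever survives every stage is 'other'.
--
-- RULES = [
--     ('config',     lambda f: any(x in f.lower() for x in ['config', '.json', '.yml', '.yaml'])),
--     ('docs',       lambda f: any(x in f.lower() for x in ['.md', 'readme', 'doc'])),
--     ('lambdas',    lambda f: 'lambda' in f.lower() or '/lambdas/' in f),
--     ('frontend',   lambda f: any(x in f.lower() for x in ['frontend', '.html', '.php', '.css', '.js'])),
--     ('tests',      lambda f: 'test' in f.lower()),
--     ('deployment', lambda f: any(x in f.lower() for x in ['deploy', 'requirement'])),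
--     ('core',       lambda f: any(x in f.lower() for x in ['src/', 'core/', '.py']) and 'test' not in f.lower()),
-- ]
--
--
-- def categorize_changes(changes):
--     remaining = [(status, f) for status, files in changes.items() for f in files]
--     categories = {}
--     for name, pred in RULES:
--         matched, rest = [], []
--         for entry in remaining:
--             (matched if pred(entry[1]) else rest).append(entry)
--         categories[name] = matched
--         remaining = rest
--     categories['other'] = remaining
--     return categories
-- ===== Notes on version B (the rewrite author's own statement) =====
-- stated objective: alternative
-- what changed: Replaces A's single pass over files with an elif cascade mutating per-category lists by a sieve: the loop is transposed to iterate over the ordered categories, each stage partitioning the shrinking stream of (status, file) entries into that bucket and a remainder, with the final remainder becoming 'other'.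
import Mathlib
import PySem

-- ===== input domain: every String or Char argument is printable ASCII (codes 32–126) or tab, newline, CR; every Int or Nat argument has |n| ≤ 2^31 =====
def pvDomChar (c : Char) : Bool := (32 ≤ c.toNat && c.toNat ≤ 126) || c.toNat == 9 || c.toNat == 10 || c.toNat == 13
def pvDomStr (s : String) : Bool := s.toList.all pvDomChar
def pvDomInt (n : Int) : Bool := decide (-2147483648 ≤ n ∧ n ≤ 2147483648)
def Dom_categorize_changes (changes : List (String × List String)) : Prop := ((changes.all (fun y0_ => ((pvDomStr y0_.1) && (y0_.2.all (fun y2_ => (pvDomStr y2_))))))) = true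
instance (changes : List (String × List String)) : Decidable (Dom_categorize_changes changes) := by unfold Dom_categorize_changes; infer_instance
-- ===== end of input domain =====

-- B replaces A's single elif-cascade pass that mutates per-category buckets by a sieve:
-- it iterates over the categories, each stage partitioning the shrinking entry stream (alternative decomposition, same cost).


-- ===== PORT A =====

-- one file of the loop body: the elif cascade appending (status, file) to the chosen bucket
def pvFileStepA (d : PySem.Dict String (List (String × String))) (status file : String) :
    PySem.Dict String (List (String × String)) :=
  let low := PySem.Str.lower file
  if ["config", ".json", ".yml", ".yaml"].any (fun x => PySem.Str.isIn x low) then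
    d.modify "config" [] (· ++ [(status, file)])
  else if [".md", "readme", "doc"].any (fun x => PySem.Str.isIn x low) then
    d.modify "docs" [] (· ++ [(status, file)])
  else if PySem.Str.isIn "lambda" low || PySem.Str.isIn "/lambdas/" file then
    d.modify "lambdas" [] (· ++ [(status, file)])
  else if ["frontend", ".html", ".php", ".css", ".js"].any (fun x => PySem.Str.isIn x low) then
    d.modify "frontend" [] (· ++ [(status, file)])
  else if PySem.Str.isIn "test" low then
    d.modify "tests" [] (· ++ [(status, file)])
  else if ["deploy", "requirement"].any (fun x => PySem.Str.isIn x low) then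
    d.modify "deployment" [] (· ++ [(status, file)])
  else if (["src/", "core/", ".py"].any (fun x => PySem.Str.isIn x low)) && !(PySem.Str.isIn "test" low) then
    d.modify "core" [] (· ++ [(status, file)])
  else
    d.modify "other" [] (· ++ [(status, file)])

-- 'categories' is the literal initial dict of the Python; inlined (a local name only)
def categorize_changes (changes : List (String × List String)) : List (String × List (String × String)) :=
  (changes.foldl (fun d sf => sf.2.foldl (fun d file => pvFileStepA d sf.1 file) d)
    (PySem.Dict.ofList [("config", []), ("docs", []), ("lambdas", []), ("frontend", []),
                        ("tests", []), ("deployment", []), ("core", []), ("other", [])])).items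

-- ===== PORT B =====

-- the ordered rules table (RULES in Source B); each predicate recomputes f.lower() as Source B does
def pvRulesB : List (String × (String → Bool)) :=
  [("config",     fun f => ["config", ".json", ".yml", ".yaml"].any (fun x => PySem.Str.isIn x (PySem.Str.lower f))),
   ("docs",       fun f => [".md", "readme", "doc"].any (fun x => PySem.Str.isIn x (PySem.Str.lower f))),
   ("lambdas",    fun f => PySem.Str.isIn "lambda" (PySem.Str.lower f) || PySem.Str.isIn "/lambdas/" f),
   ("frontend",   fun f => ["frontend", ".html", ".php", ".css", ".js"].any (fun x => PySem.Str.isIn x (PySem.Str.lower f))),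
   ("tests",      fun f => PySem.Str.isIn "test" (PySem.Str.lower f)),
   ("deployment", fun f => ["deploy", "requirement"].any (fun x => PySem.Str.isIn x (PySem.Str.lower f))),
   ("core",       fun f => (["src/", "core/", ".py"].any (fun x => PySem.Str.isIn x (PySem.Str.lower f))) && !(PySem.Str.isIn "test" (PySem.Str.lower f)))]

-- the sieve: one stage per rule, partitioning the remaining entries; the final remainder is 'other'
def pvSieve : List (String × (String → Bool)) → List (String × String) → List (String × List (String × String))
  | [], remaining => [("other", remaining)]
  | (name, pred) :: rs, remaining =>
      let part := remaining.partition (fun entry => pred entry.2)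
      (name, part.1) :: pvSieve rs part.2

def categorize_changes_alt (changes : List (String × List String)) : List (String × List (String × String)) :=
  pvSieve pvRulesB (changes.flatMap (fun sf => sf.2.map (fun f => (sf.1, f))))

-- ===== PRECONDITION & SPEC =====
def Spec_categorize_changes (changes : List (String × List String)) (out : List (String × List (String × String))) : Prop := out = categorize_changes_alt changes
instance (changes : List (String × List String)) (out : List (String × List (String × String))) : Decidable (Spec_categorize_changes changes out) := by unfold Spec_categorize_changes; infer_instance

-- ===== CLAIM (what is proved, stated in full; the proofs are below) =====
def Claim_equal_categorize_changes : Prop := ∀ (changes : List (String × List String)), Dom_categorize_changes changes → Spec_categorize_changes changes (categorize_changes changes)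

-- ===== LEMMAS AND PROOFS =====

-- first matching rule of rs wins, else "other"
def pvClassifyW (rs : List (String × (String → Bool))) (file : String) : String :=
  ((rs.find? (fun r => r.2 file)).map (·.1)).getD "other"

def pvCategoryNames : List String := pvRulesB.map (·.1) ++ ["other"]

-- A's cascade appends (status, file) to exactly the bucket the first matching rule names
theorem pvFileStepA_eq (d : PySem.Dict String (List (String × String))) (status file : String) :
    pvFileStepA d status file = d.modify (pvClassifyW pvRulesB file) [] (· ++ [(status, file)]) := by
  simp only [pvFileStepA, pvClassifyW, pvRulesB, List.find?]
  repeat' split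
  all_goals simp_all

-- the classifier only ever produces a rule name or "other"
theorem pvClassifyW_mem (rs : List (String × (String → Bool))) (file : String) :
    pvClassifyW rs file ∈ rs.map (·.1) ++ ["other"] := by
  induction rs with
  | nil => simp [pvClassifyW]
  | cons r rest ih =>
      cases h : r.2 file with
      | true => simp [pvClassifyW, List.find?, h]
      | false =>
          simp only [pvClassifyW, List.find?, h, List.map_cons, List.cons_append]
          exact List.mem_cons_of_mem _ ih

-- flatten A's nested loop into one fold over the classified entry stream
theorem pvFlatten (changes : List (String × List String))
    (d : PySem.Dict String (List (String × String))) :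
    changes.foldl (fun d sf => sf.2.foldl (fun d file => pvFileStepA d sf.1 file) d) d =
      (changes.flatMap (fun sf => sf.2.map (fun f => (pvClassifyW pvRulesB f, (sf.1, f))))).foldl
        (fun d t => d.modify t.1 [] (· ++ [t.2])) d := by
  induction changes generalizing d with
  | nil => rfl
  | cons sf rest ih =>
      simp only [List.foldl_cons, List.flatMap_cons, List.foldl_append, ih, List.foldl_map]
      congr 1
      exact PySem.List.foldl_congr_mem _ _ _ _ (fun acc f _ => pvFileStepA_eq acc sf.1 f)

-- the sieve characterised: each bucket is the entries whose first matching rule is its name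
theorem pvSieve_char (rs : List (String × (String → Bool))) (rem : List (String × String))
    (hnd : (rs.map (·.1)).Nodup) (hoth : "other" ∉ rs.map (·.1)) :
    pvSieve rs rem =
      (rs.map (·.1) ++ ["other"]).map
        (fun name => (name, rem.filter (fun t => pvClassifyW rs t.2 == name))) := by
  induction rs generalizing rem with
  | nil =>
      simp [pvSieve, pvClassifyW]
  | cons r rest ih =>
      obtain ⟨n, p⟩ := r
      simp only [List.map_cons, List.nodup_cons, List.mem_cons] at hnd hoth
      rw [not_or] at hoth
      have hcls : ∀ f : String, pvClassifyW ((n, p) :: rest) f =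
          if p f then n else pvClassifyW rest f := by
        intro f
        simp only [pvClassifyW, List.find?]
        cases h : p f <;> simp [h]
      have hrest_ne : ∀ f : String, pvClassifyW rest f ≠ n := by
        intro f h
        rcases List.mem_append.mp (pvClassifyW_mem rest f) with h' | h'
        · exact hnd.1 (h ▸ h')
        · exact hoth.1 ((List.mem_singleton.mp h').symm.trans h)
      simp only [pvSieve, List.partition_eq_filter_filter, List.map_cons, List.cons_append]
      refine List.cons_eq_cons.mpr ⟨?_, ?_⟩
      · -- head bucket
        congr 1
        apply List.filter_congr
        intro t _
        rw [hcls t.2]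
        cases h : p t.2 <;> simp [hrest_ne t.2]
      · -- remaining buckets
        rw [ih _ hnd.2 hoth.2]
        apply List.map_congr_left
        intro m hm
        have hmn : m ≠ n := by
          rcases List.mem_append.mp hm with h' | h'
          · intro he; exact hnd.1 (he ▸ h')
          · intro he; exact hoth.1 (he ▸ (List.mem_singleton.mp h') ▸ rfl)
        congr 1
        rw [List.filter_filter]
        apply List.filter_congr
        intro t _
        rw [hcls t.2]
        cases h : p t.2 with
        | false => simp [h]
        | true => simp [h]; exact fun he => hmn he.symm

-- ===== VERDICT (by name: the statement is the Claim_ definition above) =====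
theorem categorize_changes_spec : Claim_equal_categorize_changes := by
  intro changes _
  show categorize_changes changes = categorize_changes_alt changes
  unfold categorize_changes categorize_changes_alt
  rw [pvFlatten]
  set pairs := changes.flatMap (fun sf => sf.2.map (fun f => (sf.1, f))) with hp
  set tagged := changes.flatMap (fun sf => sf.2.map (fun f => (pvClassifyW pvRulesB f, (sf.1, f)))) with htag
  have htp : tagged = pairs.map (fun t => (pvClassifyW pvRulesB t.2, t)) := by
    simp [htag, hp, List.map_flatMap, Function.comp_def, List.map_map]
  set d0 : PySem.Dict String (List (String × String)) :=
    PySem.Dict.ofList [("config", []), ("docs", []), ("lambdas", []), ("frontend", []),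
                       ("tests", []), ("deployment", []), ("core", []), ("other", [])] with hd0
  have hkeys : (tagged.foldl (fun d t => d.modify t.1 [] (· ++ [t.2])) d0).keys = pvCategoryNames := by
    rw [PySem.Dict.keys_foldl_modify_key tagged (·.1) [] (fun _ t v => v ++ [t.2]) d0,
        PySem.Set.update_eq_append_filter]
    have hmem : ∀ y ∈ PySem.Set.ofList (tagged.map (·.1)),
        ¬ (PySem.Set.contains d0.keys y = false) := by
      intro y hy
      rcases List.mem_map.mp ((PySem.Set.mem_ofList _ _).mp hy) with ⟨t, ht, rfl⟩
      have : t.1 ∈ pvCategoryNames := by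
        rcases List.mem_flatMap.mp (htag ▸ ht) with ⟨sf, _, hm⟩
        rcases List.mem_map.mp hm with ⟨f, _, rfl⟩
        exact pvClassifyW_mem pvRulesB f
      simp only [pvCategoryNames, pvRulesB, List.map, List.cons_append, List.nil_append,
        List.mem_cons, List.not_mem_nil, or_false] at this
      rcases this with h|h|h|h|h|h|h|h <;> rw [h] <;> decide
    rw [List.filter_eq_nil_iff.mpr (by intro y hy; simpa using hmem y hy), List.append_nil]
    decide
  have hnd : (tagged.foldl (fun d t => d.modify t.1 [] (· ++ [t.2])) d0).keys.Nodup :=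
    hkeys ▸ (by decide)
  rw [PySem.Dict.items_eq_map_keys _ hnd ([] : List (String × String)), hkeys]
  rw [pvSieve_char pvRulesB pairs (by decide) (by decide)]
  show pvCategoryNames.map _ = (pvRulesB.map (·.1) ++ ["other"]).map _
  refine List.map_congr_left (fun name hname => ?_)
  rw [PySem.Dict.getD_foldl_modify_append tagged d0 name]
  have h0 : d0.getD name [] = [] := by fin_cases hname <;> decide
  rw [h0, List.nil_append]
  rw [htp, List.filter_map]
  simp [Function.comp_def]
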